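-- pv_equiv track=rewrite | github.com/Dr0x3525/Proyecto-final-programacion | ejercicios_parciales/ejercicios_recuperacion_parcial_1/ejercicio_2.py | encontrar_segundo_fib
-- ===== SOURCE A (Python) =====
-- def comprobar_ser_fibbonaci(numero):
--     numero = int(numero)
--     f1 = 0
--     f2 = 1
--     while f1 <= numero:
--         if f1 == numero:
--             return True
--         temp =  f1
--         f1 = f2
--         f2 = f1 + temp
--     return False
--
-- def encontrar_segundo_fib(vector):
--     contador_fib = 0
--     for indice in range(0,len(vector)):
--         if comprobar_ser_fibbonaci(vector[indice]):
--             contador_fib += 1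
--             if contador_fib == 2:
--                 segundo_fib = vector[indice]
--                 return indice, segundo_fib
--         indice +=1
--     return None,None
-- ===== SOURCE B (Python) =====
-- def encontrar_segundo_fib(vector):
--     if vector:
--         limit = max(vector)
--         fibs = set()
--         a, b = 0, 1
--         while a <= limit:
--             fibs.add(a)
--             a, b = b, a + b
--     else:
--         fibs = set()
--     hits = [(i, v) for i, v in enumerate(vector) if v in fibs]
--     if len(hits) >= 2:
--         return hits[1]
--     return (None, None)
-- ===== Notes on version B (the rewrite author's own statement) =====
-- stated objective: alternative
-- what changed: Instead of regenerating the Fibonacci sequence from 0,1 for every element, B builds the set of Fibonacci numbers up to max(vector) once and then selects the second element of the vector belonging to that set via a filtered enumerate.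
import Mathlib
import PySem

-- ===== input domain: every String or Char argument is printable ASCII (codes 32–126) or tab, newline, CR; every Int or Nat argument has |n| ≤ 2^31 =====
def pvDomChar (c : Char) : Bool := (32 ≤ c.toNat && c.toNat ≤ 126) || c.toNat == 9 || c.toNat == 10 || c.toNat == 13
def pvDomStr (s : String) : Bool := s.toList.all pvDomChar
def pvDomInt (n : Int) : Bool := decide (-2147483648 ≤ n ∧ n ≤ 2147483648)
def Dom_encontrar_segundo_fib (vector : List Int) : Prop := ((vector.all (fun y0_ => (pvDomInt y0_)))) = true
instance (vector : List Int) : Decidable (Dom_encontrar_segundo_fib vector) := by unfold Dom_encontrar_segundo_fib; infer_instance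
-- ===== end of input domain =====

-- B replaces A's per-element iterative Fibonacci generator by one Fibonacci set built up to
-- max(vector), then picks the second matching (index, value) pair from a filtered enumerate
-- (objective: alternative decomposition).

-- ===== PORT A =====
-- while f1 <= numero: … (f1, f2) := (f2, f1 + f2); the invariant argument only carries
-- facts the loop maintains, for termination.
def fibLoop (numero f1 f2 : Int)
    (h : 0 ≤ f1 ∧ 1 ≤ f2 ∧ f1 ≤ f2 ∧ f2 ≤ 2 * f1 + 1) : Bool :=
  if f1 ≤ numero then
    if f1 = numero then true
    else fibLoop numero f2 (f1 + f2) (by omega)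
  else false
termination_by (3 * numero + 2 - (f1 + f2)).toNat
decreasing_by omega

-- int(numero) is the identity on the Int inputs admitted here
def comprobar_ser_fibbonaci (numero : Int) : Bool := fibLoop numero 0 1 (by omega)

-- the for-loop over range(0, len(vector)) with the running contador_fib
def aGo : List Int → Int → Int → Option Int × Option Int
  | [], _, _ => (none, none)
  | v :: rest, contador_fib, indice =>
    if comprobar_ser_fibbonaci v then
      if contador_fib + 1 = 2 then (some indice, some v)
      else aGo rest (contador_fib + 1) (indice + 1)
    else aGo rest contador_fib (indice + 1)

def encontrar_segundo_fib (vector : List Int) : Option Int × Option Int :=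
  aGo vector 0 0

-- ===== PORT B =====
-- while a <= limit: fibs.add(a); (a, b) := (b, a + b)
def buildFibs (limit a b : Int) (fibs : PySem.Set Int)
    (h : 0 ≤ a ∧ 1 ≤ b ∧ a ≤ b ∧ b ≤ 2 * a + 1) : PySem.Set Int :=
  if a ≤ limit then buildFibs limit b (a + b) (PySem.Set.add fibs a) (by omega)
  else fibs
termination_by (3 * limit + 2 - (a + b)).toNat
decreasing_by omega

def encontrar_segundo_fib_alt (vector : List Int) : Option Int × Option Int :=
  let fibs : PySem.Set Int :=
    match PySem.List.max? vector (fun x => x) with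
    | some limit => buildFibs limit 0 1 PySem.Set.empty (by omega)
    | none => PySem.Set.empty
  let hits := (PySem.List.enumerate vector 0).filter (fun p => PySem.Set.contains fibs p.2)
  match hits with
  | _ :: (i, v) :: _ => (some i, some v)
  | _ => (none, none)

-- ===== PRECONDITION & SPEC =====
def Spec_encontrar_segundo_fib (vector : List Int) (out : Option Int × Option Int) : Prop := out = encontrar_segundo_fib_alt vector
instance (vector : List Int) (out : Option Int × Option Int) : Decidable (Spec_encontrar_segundo_fib vector out) := by unfold Spec_encontrar_segundo_fib; infer_instance

-- ===== CLAIM (what is proved, stated in full; the proofs are below) =====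
def Claim_equal_encontrar_segundo_fib : Prop := ∀ (vector : List Int), Dom_encontrar_segundo_fib vector → Spec_encontrar_segundo_fib vector (encontrar_segundo_fib vector)

-- ===== LEMMAS AND PROOFS =====

theorem fibLoop_of_lt {numero f1 f2 : Int} {h} (hlt : numero < f1) :
    fibLoop numero f1 f2 h = false := by
  unfold fibLoop
  simp [show ¬ f1 ≤ numero by omega]

-- the set built by B's loop contains exactly the prior elements plus the numbers A's test accepts
theorem contains_buildFibs (limit a b : Int) (fibs : PySem.Set Int) (h) (x : Int)
    (hx : x ≤ limit) :
    PySem.Set.contains (buildFibs limit a b fibs h) x =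
      (PySem.Set.contains fibs x || fibLoop x a b h) := by
  fun_induction buildFibs limit a b fibs h with
  | case1 a b fibs h hle ih =>
    rw [ih]
    by_cases hax : x = a
    · subst hax
      rw [show fibLoop x x b h = true by unfold fibLoop; simp]
      simp [PySem.Set.mem_add]
    · by_cases hlt : x < a
      · rw [fibLoop_of_lt hlt, fibLoop_of_lt (by omega : x < b)]
        simp [PySem.Set.mem_add, hax]
      · have : fibLoop x a b h = fibLoop x b (a + b) (by omega) := by
          conv_lhs => unfold fibLoop
          simp [show a ≤ x by omega, show ¬ a = x by omega]
        rw [this]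
        simp [PySem.Set.mem_add, hax]
  | case2 a b fibs h hgt =>
    rw [fibLoop_of_lt (by omega : x < a)]
    simp

-- every element's Fibonacci test agrees with membership in B's precomputed set
theorem comprobar_eq_contains (vector : List Int) (fibs : PySem.Set Int)
    (hfibs : fibs = (match PySem.List.max? vector (fun x => x) with
      | some limit => buildFibs limit 0 1 PySem.Set.empty (by omega)
      | none => PySem.Set.empty)) :
    ∀ v ∈ vector, comprobar_ser_fibbonaci v = PySem.Set.contains fibs v := by
  intro v hv
  cases hmax : PySem.List.max? vector (fun x => x) with
  | none =>
    exact absurd (((PySem.List.max?_eq_none_iff vector _).mp hmax) ▸ hv) (by simp)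
  | some limit =>
    have hle : v ≤ limit := PySem.List.max?_isMax hmax v hv
    rw [hfibs, hmax]
    rw [contains_buildFibs _ _ _ _ _ _ hle]
    simp [comprobar_ser_fibbonaci, PySem.Set.empty]

-- A's loop after the first hit = the FIRST remaining hit, as B's filter sees it
theorem aGo_one (l : List Int) (p : Int → Bool)
    (hp : ∀ v ∈ l, comprobar_ser_fibbonaci v = p v) : ∀ i : Int,
    aGo l 1 i = (match (PySem.List.enumerate l i).filter (fun q => p q.2) with
      | (j, v) :: _ => (some j, some v)
      | [] => (none, none)) := by
  induction l with
  | nil => intro i; simp [aGo, PySem.List.enumerate_nil]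
  | cons v rest ih =>
    intro i
    rw [PySem.List.enumerate_cons]
    by_cases hv : comprobar_ser_fibbonaci v = true
    · simp [aGo, ← hp v (by simp), hv]
    · simp only [aGo, hv, List.filter_cons]
      rw [show p v = false by rw [← hp v (by simp)]; simpa using hv]
      simpa using ih (fun w hw => hp w (by simp [hw])) (i + 1)

-- A's full loop = the SECOND hit of B's filter
theorem aGo_zero (l : List Int) (p : Int → Bool)
    (hp : ∀ v ∈ l, comprobar_ser_fibbonaci v = p v) : ∀ i : Int,
    aGo l 0 i = (match (PySem.List.enumerate l i).filter (fun q => p q.2) with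
      | _ :: (j, v) :: _ => (some j, some v)
      | _ => (none, none)) := by
  induction l with
  | nil => intro i; simp [aGo, PySem.List.enumerate_nil]
  | cons v rest ih =>
    intro i
    rw [PySem.List.enumerate_cons]
    by_cases hv : comprobar_ser_fibbonaci v = true
    · have hpv : p v = true := by rw [← hp v (by simp)]; exact hv
      have h1 := aGo_one rest p (fun w hw => hp w (by simp [hw])) (i + 1)
      simp only [aGo, hv, if_true, List.filter_cons, hpv]
      norm_num
      cases hfil : (PySem.List.enumerate rest (i + 1)).filter (fun q => p q.2) with
      | nil => rw [hfil] at h1; simpa using h1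
      | cons q tl => obtain ⟨j, w⟩ := q; rw [hfil] at h1; simpa using h1
    · have hpv : p v = false := by rw [← hp v (by simp)]; simpa using hv
      simp only [aGo, hv, List.filter_cons, hpv]
      simpa using ih (fun w hw => hp w (by simp [hw])) (i + 1)

-- ===== VERDICT (by name: the statement is the Claim_ definition above) =====
theorem encontrar_segundo_fib_spec : Claim_equal_encontrar_segundo_fib := by
  intro vector _
  unfold Spec_encontrar_segundo_fib encontrar_segundo_fib encontrar_segundo_fib_alt
  exact aGo_zero vector _ (comprobar_eq_contains vector _ rfl) 0
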